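-- pv_equiv track=rewrite | github.com/cloudforet-io/plugin-aws-cloud-service-inven-collector | src/spaceone/inventory/connector/aws_kinesis_firehose_connector/connector.py | initiate_destinations_ref
-- ===== SOURCE A (Python) =====
-- def initiate_destinations_ref(destn_types, destinations):
--     destinations_ref = dict()
--     for destn_type in destn_types:
--         destinations_ref[destn_type] = list()
--
--     for destination in destinations:
--         for key, value in destination.items():
--             if key in destn_types:
--                 destinations_ref[key].append(value)
--     return destinations_ref
-- ===== SOURCE B (Python) =====
-- def initiate_destinations_ref(destn_types, destinations):
--     return {t: [d[t] for d in destinations if t in d] for t in destn_types}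
-- ===== Notes on version B (the rewrite author's own statement) =====
-- stated objective: simpler
-- what changed: A makes one pass over destinations, testing each key's membership in the destn_types list and mutating per-type lists; B is a single dict comprehension with the loop nesting inverted (outer loop over destn_types, inner scan over destinations via hashed first-match lookup), which also removes A's linear `key in destn_types` list scan.
import Mathlib
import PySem

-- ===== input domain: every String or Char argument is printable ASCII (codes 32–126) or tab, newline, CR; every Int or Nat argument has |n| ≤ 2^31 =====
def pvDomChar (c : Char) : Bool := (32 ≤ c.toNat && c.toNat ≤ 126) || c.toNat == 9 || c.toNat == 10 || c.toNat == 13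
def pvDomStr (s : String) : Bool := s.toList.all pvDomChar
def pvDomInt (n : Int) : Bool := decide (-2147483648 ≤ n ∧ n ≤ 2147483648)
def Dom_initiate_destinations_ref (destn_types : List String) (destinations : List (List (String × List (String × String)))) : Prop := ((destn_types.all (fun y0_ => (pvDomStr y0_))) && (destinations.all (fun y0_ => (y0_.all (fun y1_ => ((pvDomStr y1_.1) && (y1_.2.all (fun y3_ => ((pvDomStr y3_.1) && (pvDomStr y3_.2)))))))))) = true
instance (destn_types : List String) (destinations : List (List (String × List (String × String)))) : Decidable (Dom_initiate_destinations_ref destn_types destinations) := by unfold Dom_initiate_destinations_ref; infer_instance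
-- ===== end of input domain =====

-- B replaces A's destinations-outer mutation loop by a dict comprehension with the nesting inverted
-- (outer loop over destn_types, inner scan over destinations via first-match lookup); objective: simpler.

-- ===== PORT A =====
def initiate_destinations_ref (destn_types : List String) (destinations : List (List (String × List (String × String)))) : List (String × List (List (String × String))) :=
  -- destinations_ref = dict(); for destn_type in destn_types: destinations_ref[destn_type] = list()
  let ref : PySem.Dict String (List (List (String × String))) :=
    destn_types.foldl (fun acc t => acc.insert t []) PySem.Dict.empty
  -- for destination in destinations: for key, value in destination.items():
  --   if key in destn_types: destinations_ref[key].append(value)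
  (destinations.foldl (fun acc d =>
      d.foldl (fun acc kv =>
        if kv.1 ∈ destn_types then acc.modify kv.1 [] (fun l => l ++ [kv.2]) else acc) acc)
    ref).items

-- ===== PORT B =====
def initiate_destinations_ref_alt (destn_types : List String) (destinations : List (List (String × List (String × String)))) : List (String × List (List (String × String))) :=
  -- {t: [d[t] for d in destinations if t in d] for t in destn_types}
  (destn_types.foldl (fun acc t =>
      acc.insert t (destinations.filterMap (fun d => (PySem.Dict.mk d).get? t)))
    (PySem.Dict.empty : PySem.Dict String (List (List (String × String))))).items

-- ===== PRECONDITION & SPEC =====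
-- Pre_ excludes inputs in which some destination association list carries a duplicate key: such a
-- list does not represent any Python dict (dicts have unique keys), so A's items-iteration order
-- of values there is not defined by the Python source.
def Pre_initiate_destinations_ref (destn_types : List String) (destinations : List (List (String × List (String × String)))) : Prop :=
  ∀ d ∈ destinations, (d.map Prod.fst).Nodup
instance (destn_types : List String) (destinations : List (List (String × List (String × String)))) : Decidable (Pre_initiate_destinations_ref destn_types destinations) := by unfold Pre_initiate_destinations_ref; infer_instance

def pvWitness_initiate_destinations_ref : List String × (List (List (String × List (String × String)))) :=
  (["a", "b"], [[("a", [("x", "1")])], [("b", [("y", "2")]), ("a", [("z", "3")])], [("c", [])]])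

def Spec_initiate_destinations_ref (destn_types : List String) (destinations : List (List (String × List (String × String)))) (out : List (String × List (List (String × String)))) : Prop := out = initiate_destinations_ref_alt destn_types destinations
instance (destn_types : List String) (destinations : List (List (String × List (String × String)))) (out : List (String × List (List (String × String)))) : Decidable (Spec_initiate_destinations_ref destn_types destinations out) := by unfold Spec_initiate_destinations_ref; infer_instance

-- ===== CLAIM (what is proved, stated in full; the proofs are below) =====
def Claim_equal_initiate_destinations_ref : Prop := ∀ (destn_types : List String) (destinations : List (List (String × List (String × String)))), Dom_initiate_destinations_ref destn_types destinations → Pre_initiate_destinations_ref destn_types destinations → Spec_initiate_destinations_ref destn_types destinations (initiate_destinations_ref destn_types destinations)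

-- ===== LEMMAS AND PROOFS =====

-- B-side / ref fold: getD of an insert-fold with computed values
theorem pv_getD_foldl_insert (ts : List String) (g : String → List (List (String × String)))
    (acc : PySem.Dict String (List (List (String × String)))) (c : String) :
    (ts.foldl (fun a t => a.insert t (g t)) acc).getD c [] =
      if c ∈ ts then g c else acc.getD c [] := by
  induction ts generalizing acc with
  | nil => simp
  | cons t ts ih =>
    simp only [List.foldl_cons, ih, PySem.Dict.getD_insert, List.mem_cons]
    by_cases hts : c ∈ ts <;> by_cases hct : c = t <;> simp [hts, hct]

-- A inner loop: getD at c ∈ ts appends the values of pairs keyed c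
theorem pv_getD_inner (ts : List String) (d : List (String × List (String × String)))
    (acc : PySem.Dict String (List (List (String × String)))) (c : String) (hc : c ∈ ts) :
    (d.foldl (fun a kv => if kv.1 ∈ ts then a.modify kv.1 [] (fun l => l ++ [kv.2]) else a) acc).getD c [] =
      acc.getD c [] ++ (d.filter (fun p => p.1 == c)).map (·.2) := by
  induction d generalizing acc with
  | nil => simp
  | cons kv d ih =>
    by_cases h : kv.1 ∈ ts
    · by_cases hck : kv.1 = c
      · subst hck; simp [hc, ih]
      · simp [h, ih, PySem.Dict.getD_modify, Ne.symm hck, hck]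
    · have hck : kv.1 ≠ c := fun e => h (e ▸ hc)
      simp [h, ih, hck]

-- A inner loop: keys unchanged when every ts-key is already present
theorem pv_keys_inner (ts : List String) (d : List (String × List (String × String)))
    (acc : PySem.Dict String (List (List (String × String))))
    (hacc : ∀ t ∈ ts, acc.contains t = true) :
    (d.foldl (fun a kv => if kv.1 ∈ ts then a.modify kv.1 [] (fun l => l ++ [kv.2]) else a) acc).keys = acc.keys := by
  induction d generalizing acc with
  | nil => rfl
  | cons kv d ih =>
    by_cases h : kv.1 ∈ ts
    · simp only [List.foldl_cons, if_pos h]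
      rw [ih _ ?_, PySem.Dict.keys_modify, PySem.Dict.keys_insert_of_contains _ _ (hacc _ h)]
      intro t ht
      rw [PySem.Dict.contains_modify]
      simp [hacc t ht]
    · simp only [List.foldl_cons, if_neg h]
      exact ih _ hacc

-- A outer loop: keys unchanged and getD accumulates
theorem pv_outer (ts : List String) (ds : List (List (String × List (String × String))))
    (acc : PySem.Dict String (List (List (String × String))))
    (hacc : ∀ t ∈ ts, acc.contains t = true) :
    (ds.foldl (fun a d => d.foldl (fun a kv => if kv.1 ∈ ts then a.modify kv.1 [] (fun l => l ++ [kv.2]) else a) a) acc).keys = acc.keys ∧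
    ∀ c ∈ ts,
      (ds.foldl (fun a d => d.foldl (fun a kv => if kv.1 ∈ ts then a.modify kv.1 [] (fun l => l ++ [kv.2]) else a) a) acc).getD c [] =
        acc.getD c [] ++ ds.flatMap (fun d => (d.filter (fun p => p.1 == c)).map (·.2)) := by
  induction ds generalizing acc with
  | nil => simp
  | cons d ds ih =>
    have hkeys := pv_keys_inner ts d acc hacc
    have hacc' : ∀ t ∈ ts, (d.foldl (fun a kv => if kv.1 ∈ ts then a.modify kv.1 [] (fun l => l ++ [kv.2]) else a) acc).contains t = true := by
      intro t ht
      rw [PySem.Dict.contains_iff_mem_keys, hkeys, ← PySem.Dict.contains_iff_mem_keys]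
      exact hacc t ht
    obtain ⟨ihk, ihg⟩ := ih _ hacc'
    refine ⟨by simpa [hkeys] using ihk, ?_⟩
    intro c hc
    simp only [List.foldl_cons, List.flatMap_cons]
    rw [ihg c hc, pv_getD_inner ts d acc c hc, List.append_assoc]

-- one destination with unique keys contributes its first-match lookup
theorem pv_filter_nodup (d : List (String × List (String × String))) (c : String)
    (hnd : (d.map Prod.fst).Nodup) :
    (d.filter (fun p => p.1 == c)).map (·.2) = ((PySem.Dict.mk d).get? c).toList := by
  induction d with
  | nil => simp [PySem.Dict.get?]
  | cons kv d ih =>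
    obtain ⟨k, v⟩ := kv
    simp only [List.map_cons, List.nodup_cons] at hnd
    by_cases h : k = c
    · have hfil : (d.filter (fun p => p.1 == c)) = [] := by
        rw [List.filter_eq_nil_iff]
        intro p hp hpc
        apply hnd.1
        have hm : p.1 ∈ d.map Prod.fst := List.mem_map_of_mem hp
        have hp1 : p.1 = c := by simpa using hpc
        rw [h, ← hp1]
        exact hm
      subst h
      simp [PySem.Dict.get?_mk_cons, hfil]
    · simp [PySem.Dict.get?_mk_cons, h, ih hnd.2]


theorem pv_flatMap_nodup (ds : List (List (String × List (String × String)))) (k : String)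
    (hpre : ∀ d ∈ ds, (d.map Prod.fst).Nodup) :
    ds.flatMap (fun d => (d.filter (fun p => p.1 == k)).map (·.2)) =
      ds.filterMap (fun d => (PySem.Dict.mk d).get? k) := by
  rw [List.filterMap_eq_flatMap_toList]
  induction ds with
  | nil => rfl
  | cons d ds ih =>
    simp only [List.flatMap_cons]
    rw [pv_filter_nodup d k (hpre d (List.mem_cons_self)),
      ih (fun d hd => hpre d (List.mem_cons_of_mem _ hd))]

theorem pv_main (ts : List String) (ds : List (List (String × List (String × String))))
    (hpre : ∀ d ∈ ds, (d.map Prod.fst).Nodup) :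
    initiate_destinations_ref ts ds = initiate_destinations_ref_alt ts ds := by
  unfold initiate_destinations_ref initiate_destinations_ref_alt
  set ref : PySem.Dict String (List (List (String × String))) :=
    ts.foldl (fun acc t => acc.insert t []) PySem.Dict.empty with href
  have hrefkeys : ref.keys = PySem.Set.ofList ts := by
    rw [href, PySem.Dict.keys_foldl_insert ts (fun _ _ => []) PySem.Dict.empty,
      PySem.Dict.keys_empty]
    exact PySem.Set.update_empty ts
  have hrefnd : ref.keys.Nodup := by rw [hrefkeys]; exact PySem.Set.nodup_ofList ts
  have hrefcont : ∀ t ∈ ts, ref.contains t = true := by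
    intro t ht
    rw [PySem.Dict.contains_iff_mem_keys, hrefkeys, PySem.Set.mem_ofList]
    exact ht
  have hrefgetD : ∀ c, ref.getD c [] = [] := by
    intro c
    rw [href, pv_getD_foldl_insert ts (fun _ => []) PySem.Dict.empty c]
    split <;> simp [PySem.Dict.getD_empty]
  obtain ⟨hAkeys, hAgetD⟩ := pv_outer ts ds ref hrefcont
  set A := ds.foldl (fun a d =>
      d.foldl (fun a kv => if kv.1 ∈ ts then a.modify kv.1 [] (fun l => l ++ [kv.2]) else a) a) ref
  set B := ts.foldl (fun acc t =>
      acc.insert t (ds.filterMap (fun d => (PySem.Dict.mk d).get? t))) PySem.Dict.empty with hB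
  have hBkeys : B.keys = PySem.Set.ofList ts := by
    rw [hB, PySem.Dict.keys_foldl_insert ts
      (fun _ t => ds.filterMap (fun d => (PySem.Dict.mk d).get? t)) PySem.Dict.empty,
      PySem.Dict.keys_empty]
    exact PySem.Set.update_empty ts
  rw [PySem.Dict.items_eq_map_keys A (by rw [hAkeys]; exact hrefnd) [],
    PySem.Dict.items_eq_map_keys B (by rw [hBkeys]; exact PySem.Set.nodup_ofList ts) [],
    hAkeys, hrefkeys, hBkeys]
  apply List.map_congr_left
  intro k hk
  have hkts : k ∈ ts := (PySem.Set.mem_ofList ts k).mp hk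
  rw [hAgetD k hkts, hrefgetD k, List.nil_append,
    hB, pv_getD_foldl_insert ts (fun t => ds.filterMap (fun d => (PySem.Dict.mk d).get? t))
      PySem.Dict.empty k, if_pos hkts, pv_flatMap_nodup ds k hpre]


-- ===== VERDICT (by name: the statement is the Claim_ definition above) =====
theorem initiate_destinations_ref_spec : Claim_equal_initiate_destinations_ref := by
  intro ts ds _ hpre
  exact pv_main ts ds hpre
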